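-- pv_equiv track=rewrite | github.com/0xhrsh/TextCompressor | main.py | greedyCompress
-- ===== SOURCE A (Python) =====
-- intSize = 2  # In bytes
--
-- def getMemorySaved(texts): # Heuristic Function (tells which phrase will lead to how much size reduction)
--     count = {}
--
--     for text in texts:
--         windowSize = intSize
--         while(windowSize < 15):
--             for i in range(len(text)-windowSize+1):
--                 phrase = text[i:i+windowSize]
--                 if len(phrase) > intSize:
--                     try:
--                         count[phrase] += 1
--                     except KeyError:
--                         count[phrase] = 1
--             windowSize += 1
--
--     memSaved = {}
--
--     for phrase in count:
--         if count[phrase] * (len(phrase) - intSize) - len(phrase) > 0: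
--             memSaved[phrase] = count[phrase] * \
--                 (len(phrase) - intSize) - len(phrase)
--
--     return memSaved
--
-- def greedyCompress(texts, n):
--     memSaved = getMemorySaved(texts)
--     mx = 0
--     bestPhrase = ""
--
--     for phrase in memSaved:
--         if(memSaved[phrase] > mx):
--             mx = memSaved[phrase]
--             bestPhrase = phrase
--
--     if mx > 0:
--         newTexts = []
--
--         for text in texts:
--             newTexts += text.split(bestPhrase)
--
--         saved, phrases = greedyCompress(newTexts, n+1)
--
--         return mx + saved, phrases + [bestPhrase]
--
--     return 0, []
-- ===== SOURCE B (Python) =====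
-- intSize = 2  # In bytes
--
-- def getMemorySaved(texts): # Heuristic Function (tells which phrase will lead to how much size reduction)
--     count = {}
--
--     for text in texts:
--         windowSize = intSize
--         while(windowSize < 15):
--             for i in range(len(text)-windowSize+1):
--                 phrase = text[i:i+windowSize]
--                 if len(phrase) > intSize:
--                     try:
--                         count[phrase] += 1
--                     except KeyError:
--                         count[phrase] = 1
--             windowSize += 1
--
--     memSaved = {}
--
--     for phrase in count:
--         if count[phrase] * (len(phrase) - intSize) - len(phrase) > 0:
--             memSaved[phrase] = count[phrase] * \
--                 (len(phrase) - intSize) - len(phrase)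
--
--     return memSaved
--
-- def greedyCompress(texts, n):
--     # iterative while-loop instead of A's recursion; phrases prepended so the
--     # final list is in the same (reverse-selection) order as A's
--     totalSaved = 0
--     phrases = []
--     while True:
--         memSaved = getMemorySaved(texts)
--         if not memSaved:
--             break
--         bestPhrase, mx = max(memSaved.items(), key=lambda kv: kv[1])
--         totalSaved += mx
--         phrases = [bestPhrase] + phrases
--         texts = [piece for text in texts for piece in text.split(bestPhrase)]
--     return totalSaved, phrases
-- ===== Notes on version B (the rewrite author's own statement) =====
-- stated objective: simpler
-- what changed: greedyCompress is rewritten as an iterative while-loop with an accumulator (prepending each selected phrase) and a max()-with-key selection over memSaved, instead of A's recursion with a hand-rolled strict-> scan and post-recursion append; n is accepted but unused, as in A.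
import Mathlib
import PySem

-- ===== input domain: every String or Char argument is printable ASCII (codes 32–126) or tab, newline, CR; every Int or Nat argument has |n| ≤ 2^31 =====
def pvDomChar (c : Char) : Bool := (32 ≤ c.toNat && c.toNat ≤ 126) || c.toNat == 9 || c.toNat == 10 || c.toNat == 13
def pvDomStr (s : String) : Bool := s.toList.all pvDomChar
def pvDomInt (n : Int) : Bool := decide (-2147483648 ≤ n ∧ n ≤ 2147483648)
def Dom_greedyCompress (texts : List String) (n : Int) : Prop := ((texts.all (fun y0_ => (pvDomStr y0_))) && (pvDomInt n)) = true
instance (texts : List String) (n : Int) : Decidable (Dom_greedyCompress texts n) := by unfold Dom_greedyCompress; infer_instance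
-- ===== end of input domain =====

-- B rewrites greedyCompress as an iterative while-loop (accumulator, prepend, max()-with-key)
-- instead of A's recursion with a hand-rolled strict-> scan; objective: simpler.
-- Both ports use fuel (total text length + 1): each Python round removes at least one
-- occurrence of a phrase of length ≥ 3, so the fuel is never exhausted on real runs.

-- ===== PORT A =====
-- shared helper getMemorySaved (identical in Source A and Source B)
-- text.split(sep): sep is always a key of memSaved (length ≥ 3), so split? is never none;
-- the getD default only makes the function total.
def pySplit (s sep : String) : List String := (PySem.Str.split? s sep).getD [s]

def getMemorySavedPort (texts : List String) : PySem.Dict String Int :=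
  let count : PySem.Dict String Int :=
    texts.foldl (fun count text =>
      -- windowSize = 2; while windowSize < 15: … ; windowSize += 1
      (PySem.List.pyRange 2 15 1).foldl (fun count windowSize =>
        (PySem.List.pyRange 0 (PySem.Str.len text - windowSize + 1) 1).foldl (fun count i =>
          let phrase := PySem.Str.slice text (some i) (some (i + windowSize))
          if PySem.Str.len phrase > 2 then
            count.insert phrase (count.getD phrase 0 + 1)   -- try += 1 / except: = 1
          else count) count) count) PySem.Dict.empty
  count.items.foldl (fun memSaved p =>
    if p.2 * (PySem.Str.len p.1 - 2) - PySem.Str.len p.1 > 0 then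
      memSaved.insert p.1 (p.2 * (PySem.Str.len p.1 - 2) - PySem.Str.len p.1)
    else memSaved) PySem.Dict.empty

def pvFuel (texts : List String) : Nat := (texts.map (fun t => t.length)).sum + 1

def greedyCompressFuel : Nat → List String → Int → Int × List String
  | 0, _, _ => (0, [])          -- fuel exhaustion: unreachable on real runs
  | f + 1, texts, n =>
    let memSaved := getMemorySavedPort texts
    let mb := memSaved.items.foldl
      (fun (acc : Int × String) p => if p.2 > acc.1 then (p.2, p.1) else acc) (0, "")
    if mb.1 > 0 then
      let newTexts := texts.foldl (fun nt text => nt ++ pySplit text mb.2) []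
      let sp := greedyCompressFuel f newTexts (n + 1)
      (mb.1 + sp.1, sp.2 ++ [mb.2])
    else (0, [])

def greedyCompress (texts : List String) (n : Int) : Int × List String :=
  greedyCompressFuel (pvFuel texts) texts n

-- ===== PORT B =====
def greedyCompressLoop : Nat → List String → Int → List String → Int × List String
  | 0, _, totalSaved, phrases => (totalSaved, phrases)   -- fuel exhaustion: unreachable
  | f + 1, texts, totalSaved, phrases =>
    let memSaved := getMemorySavedPort texts
    if memSaved.items.isEmpty then (totalSaved, phrases)
    else
      let bm := (PySem.List.max? memSaved.items (fun kv => kv.2)).getD ("", 0)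
      greedyCompressLoop f
        (texts.flatMap (fun text => pySplit text bm.1))
        (totalSaved + bm.2) (bm.1 :: phrases)

def greedyCompress_alt (texts : List String) (n : Int) : Int × List String :=
  greedyCompressLoop (pvFuel texts) texts 0 []

-- ===== PRECONDITION & SPEC =====
def Spec_greedyCompress (texts : List String) (n : Int) (out : Int × List String) : Prop := out = greedyCompress_alt texts n
instance (texts : List String) (n : Int) (out : Int × List String) : Decidable (Spec_greedyCompress texts n out) := by unfold Spec_greedyCompress; infer_instance

-- ===== CLAIM (what is proved, stated in full; the proofs are below) =====
def Claim_equal_greedyCompress : Prop := ∀ (texts : List String) (n : Int), Dom_greedyCompress texts n → Spec_greedyCompress texts n (greedyCompress texts n)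

-- ===== LEMMAS AND PROOFS =====

-- A's strict-> scan from (0, "") equals a running first-max fold when the head value is positive
theorem scan_eq_step2 (l : List (String × Int)) (q : String × Int) :
    l.foldl (fun (acc : Int × String) p => if p.2 > acc.1 then (p.2, p.1) else acc) (q.2, q.1)
      = ((l.foldl (fun (a : String × Int) x => if a.2 < x.2 then x else a) q).2,
         (l.foldl (fun (a : String × Int) x => if a.2 < x.2 then x else a) q).1) := by
  induction l generalizing q with
  | nil => rfl
  | cons x t ih =>
    simp only [List.foldl_cons]
    have h : (if x.2 > q.2 then (x.2, x.1) else (q.2, q.1))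
        = ((if q.2 < x.2 then x else q).2, (if q.2 < x.2 then x else q).1) := by
      by_cases h : q.2 < x.2 <;> simp [h]
    rw [h, ih]

theorem max?_eq_step2 (l : List (String × Int)) (q : String × Int) :
    PySem.List.max? (q :: l) (fun kv => kv.2)
      = some (l.foldl (fun (a : String × Int) x => if a.2 < x.2 then x else a) q) := by
  simp only [PySem.List.max?, List.foldl_cons]
  induction l generalizing q with
  | nil => rfl
  | cons x t ih =>
    simp only [List.foldl_cons]
    by_cases h : q.2 < x.2
    · simp only [if_pos h]; exact ih x
    · simp only [if_neg h]; exact ih q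

-- every value stored in memSaved is positive
theorem gms_pos_aux (l : List (String × Int)) (d : PySem.Dict String Int)
    (hd : ∀ p ∈ d.items, 0 < p.2) :
    ∀ p ∈ (l.foldl (fun memSaved p =>
        if p.2 * (PySem.Str.len p.1 - 2) - PySem.Str.len p.1 > 0 then
          memSaved.insert p.1 (p.2 * (PySem.Str.len p.1 - 2) - PySem.Str.len p.1)
        else memSaved) d).items, 0 < p.2 := by
  induction l generalizing d with
  | nil => exact hd
  | cons x t ih =>
    simp only [List.foldl_cons]
    by_cases h : x.2 * (PySem.Str.len x.1 - 2) - PySem.Str.len x.1 > 0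
    · simp only [h, if_true]
      refine ih _ ?_
      intro p hp
      rcases (PySem.Dict.mem_items_insert _ _ _ _).1 hp with h1 | h1
      · subst h1; exact h
      · exact hd p h1.1
    · simp only [h, if_false]; exact ih _ hd

theorem gms_pos (texts : List String) :
    ∀ p ∈ (getMemorySavedPort texts).items, 0 < p.2 := by
  unfold getMemorySavedPort
  exact gms_pos_aux _ _ (by intro p hp; simp [PySem.Dict.empty] at hp)

-- the loop invariant: B's iterative loop accumulates exactly A's recursive result
theorem loop_invariant (f : Nat) :
    ∀ (texts : List String) (n s : Int) (ps : List String),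
      greedyCompressLoop f texts s ps
        = (s + (greedyCompressFuel f texts n).1, (greedyCompressFuel f texts n).2 ++ ps) := by
  induction f with
  | zero => intro texts n s ps; simp [greedyCompressLoop, greedyCompressFuel]
  | succ f ih =>
    intro texts n s ps
    rw [greedyCompressLoop, greedyCompressFuel]
    cases hms : (getMemorySavedPort texts).items with
    | nil =>
      simp
    | cons q t =>
      have hq : 0 < q.2 := gms_pos texts q (by rw [hms]; exact List.mem_cons_self)
      have hscan := scan_eq_step2 t q
      have hmax := max?_eq_step2 t q
      set M := t.foldl (fun (a : String × Int) x => if a.2 < x.2 then x else a) q with hM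
      have hMmem : M ∈ q :: t := PySem.List.max?_mem hmax
      have hMpos : 0 < M.2 := gms_pos texts M (by rw [hms]; exact hMmem)
      have hscan0 : (q :: t).foldl
          (fun (acc : Int × String) p => if p.2 > acc.1 then (p.2, p.1) else acc) (0, "")
          = (M.2, M.1) := by
        simp only [List.foldl_cons, show ((q.2 :  Int) > 0) = True from by simp [hq], if_true]
        simpa using hscan
      simp only [hscan0, List.isEmpty_cons, hmax, Option.getD_some, hMpos, if_true,
        Bool.false_eq_true, if_false,
        PySem.List.foldl_append_eq_flatMap (fun text => pySplit text M.1), List.nil_append]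
      rw [ih _ (n + 1) (s + M.2) (M.1 :: ps)]
      simp [add_assoc]

-- ===== VERDICT (by name: the statement is the Claim_ definition above) =====
theorem greedyCompress_spec : Claim_equal_greedyCompress := by
  intro texts n _
  unfold Spec_greedyCompress greedyCompress greedyCompress_alt
  rw [loop_invariant (pvFuel texts) texts n 0 []]
  simp
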